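-- pv_equiv track=rewrite | github.com/jamesmatanle/advent_of_code | 2023/python/day01.py | find_num_right
-- ===== SOURCE A (Python) =====
-- NUMS = {
--     'one': '1',
--     'two': '2',
--     'three': '3',
--     'four': '4',
--     'five': '5',
--     'six': '6',
--     'seven': '7',
--     'eight': '8',
--     'nine': '9'
-- }
--
-- def find_num_right(S):
--     """
--     Return the first number from the right in S.
--     Can be number character or converted number word.
--     """
--     i, c = next(((i, c) for i, c in list(enumerate(S))[::-1] if c.isdigit()),
--                 (0, 'NOTFOUND'))
--     for j in range(len(S)-3, i-1, -1):
--         for k in range(j+3, j+6):  # shortest word is 3 chars, longest is 5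
--             word = S[j:k]
--             if word in NUMS:
--                 return NUMS[word]
--     return c
-- ===== SOURCE B (Python) =====
-- NUMS = {
--     'one': '1',
--     'two': '2',
--     'three': '3',
--     'four': '4',
--     'five': '5',
--     'six': '6',
--     'seven': '7',
--     'eight': '8',
--     'nine': '9'
-- }
--
-- def find_num_right(S):
--     """Single right-to-left scan: the rightmost digit or word-start wins."""
--     for p in range(len(S) - 1, -1, -1):
--         if S[p].isdigit():
--             return S[p]
--         for length in (3, 4, 5):
--             v = NUMS.get(S[p:p + length])
--             if v is not None:
--                 return v
--     return 'NOTFOUND'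
-- ===== Notes on version B (the rewrite author's own statement) =====
-- stated objective: simpler
-- what changed: Replaces A's two passes (a reversed-enumerate search for the rightmost digit, then a separate nested scan for word starts) by a single right-to-left scan that checks the digit and the three word lengths at each position and returns on the first hit.
import Mathlib
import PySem

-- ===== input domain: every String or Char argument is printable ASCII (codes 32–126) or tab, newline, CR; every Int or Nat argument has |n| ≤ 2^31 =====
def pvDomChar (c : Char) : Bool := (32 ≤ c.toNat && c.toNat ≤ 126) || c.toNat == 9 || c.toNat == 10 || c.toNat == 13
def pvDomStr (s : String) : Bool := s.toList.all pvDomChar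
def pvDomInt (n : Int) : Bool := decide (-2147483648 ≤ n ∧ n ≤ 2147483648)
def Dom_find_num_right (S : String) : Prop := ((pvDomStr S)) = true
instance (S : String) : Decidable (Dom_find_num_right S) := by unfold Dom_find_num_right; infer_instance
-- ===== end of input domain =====

-- B replaces A's two passes (rightmost-digit search, then a nested word scan) by one right-to-left scan; objective: simpler.

-- the NUMS dict, keys as code-point lists
def NUMS : PySem.Dict (List Char) String := PySem.Dict.mk
  [(['o','n','e'], "1"), (['t','w','o'], "2"), (['t','h','r','e','e'], "3"),
   (['f','o','u','r'], "4"), (['f','i','v','e'], "5"), (['s','i','x'], "6"),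
   (['s','e','v','e','n'], "7"), (['e','i','g','h','t'], "8"), (['n','i','n','e'], "9")]

-- ===== PORT A =====
-- inner loop: for k in range(j+3, j+6): word = S[j:k]; if word in NUMS: return NUMS[word]
def aInner (L : List Char) (j : Int) : List Int → Option String
  | [] => none
  | k :: rest =>
    match NUMS.get? (PySem.List.slice L (some j) (some k)) with
    | some v => some v
    | none => aInner L j rest

-- outer loop: for j in range(len(S)-3, i-1, -1)
def aOuter (L : List Char) : List Int → Option String
  | [] => none
  | j :: rest =>
    match aInner L j (PySem.List.pyRange (j + 3) (j + 6) 1) with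
    | some v => some v
    | none => aOuter L rest

def find_num_right (S : String) : String :=
  let L := S.toList
  match (PySem.List.enumerate L 0).reverse.find? (fun p => PySem.Chars.isdigit p.2) with
  | some (i, c) =>
    match aOuter L (PySem.List.pyRange ((L.length : Int) - 3) (i - 1) (-1)) with
    | some v => v
    | none => String.ofList [c]
  | none =>
    match aOuter L (PySem.List.pyRange ((L.length : Int) - 3) (0 - 1) (-1)) with
    | some v => v
    | none => "NOTFOUND"

-- ===== PORT B =====
-- for length in (3, 4, 5): v = NUMS.get(S[p:p+length]); if v is not None: return v
def checkWord (L : List Char) (p : Int) : Option String :=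
  match NUMS.get? (PySem.List.slice L (some p) (some (p + 3))) with
  | some v => some v
  | none =>
    match NUMS.get? (PySem.List.slice L (some p) (some (p + 4))) with
    | some v => some v
    | none => NUMS.get? (PySem.List.slice L (some p) (some (p + 5)))

-- for p in range(len(S)-1, -1, -1): …
def bloop (L : List Char) : List Int → String
  | [] => "NOTFOUND"
  | p :: rest =>
    match PySem.List.pyGet? L p with
    | some ch =>
      if PySem.Chars.isdigit ch then String.ofList [ch]
      else
        match checkWord L p with
        | some v => v
        | none => bloop L rest
    | none => "NOTFOUND"   -- S[p] IndexError: unreachable, p is drawn from range(len(S)-1, -1, -1)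

def find_num_right_alt (S : String) : String :=
  let L := S.toList
  bloop L (PySem.List.pyRange ((L.length : Int) - 1) (-1) (-1))

-- ===== PRECONDITION & SPEC =====
def Spec_find_num_right (S : String) (out : String) : Prop := out = find_num_right_alt S
instance (S : String) (out : String) : Decidable (Spec_find_num_right S out) := by unfold Spec_find_num_right; infer_instance

-- ===== CLAIM (what is proved, stated in full; the proofs are below) =====
def Claim_equal_find_num_right : Prop := ∀ (S : String), Dom_find_num_right S → Spec_find_num_right S (find_num_right S)

-- ===== LEMMAS AND PROOFS =====

-- proof-side view of A's digit pass: rightmost digit at index ≤ m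
def dscan (L : List Char) (m : Int) : Option (Int × Char) :=
  if _h : m < 0 then none
  else
    match PySem.List.pyGet? L m with
    | some c => if PySem.Chars.isdigit c then some (m, c) else dscan L (m - 1)
    | none => dscan L (m - 1)
termination_by (m + 1).toNat
decreasing_by all_goals omega

-- proof-side view of the word scan: first match at j from m down to t
def wscan (L : List Char) (m t : Int) : Option String :=
  if _h : m < t then none
  else
    match checkWord L m with
    | some v => some v
    | none => wscan L (m - 1) t
termination_by (m - t + 1).toNat
decreasing_by omega

theorem NUMS_keys (w : List Char) (v : String) (h : NUMS.get? w = some v) :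
    w ∈ [['o','n','e'], ['t','w','o'], ['t','h','r','e','e'], ['f','o','u','r'],
         ['f','i','v','e'], ['s','i','x'], ['s','e','v','e','n'], ['e','i','g','h','t'],
         ['n','i','n','e']] := by
  simp only [NUMS, PySem.Dict.get?_mk_cons] at h
  repeat' split at h
  all_goals simp_all [PySem.Dict.get?]

theorem get?_short (w : List Char) (h : w.length < 3) : NUMS.get? w = none := by
  cases heq : NUMS.get? w with
  | none => rfl
  | some v =>
    have := NUMS_keys w v heq
    fin_cases this <;> simp_all

theorem get?_digit_head (c : Char) (w : List Char) (h : PySem.Chars.isdigit c = true) :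
    NUMS.get? (c :: w) = none := by
  cases heq : NUMS.get? (c :: w) with
  | none => rfl
  | some v =>
    have hm := NUMS_keys (c :: w) v heq
    simp only [List.mem_cons, List.cons.injEq, List.not_mem_nil, or_false] at hm
    rcases hm with ⟨rfl, -⟩|⟨rfl, -⟩|⟨rfl, -⟩|⟨rfl, -⟩|⟨rfl, -⟩|⟨rfl, -⟩|⟨rfl, -⟩|⟨rfl, -⟩|⟨rfl, -⟩ <;>
      exact absurd h (by decide)

theorem slice_drop_take (L : List Char) (p : Int) (k : Nat) (hp : 0 ≤ p) :
    PySem.List.slice L (some p) (some (p + (k : Int))) = (L.drop p.toNat).take k := by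
  rw [PySem.List.slice_toNat L hp (by omega)]
  congr 1
  omega

theorem checkWord_none_of_right (L : List Char) (p : Int) (hp : 0 ≤ p)
    (h : (L.length : Int) - 3 < p) : checkWord L p = none := by
  have hlen : ∀ k : Nat, ((L.drop p.toNat).take k).length < 3 := by
    intro k
    have := List.length_take_le k (L.drop p.toNat)
    have h2 : (L.drop p.toNat).length = L.length - p.toNat := List.length_drop ..
    have h3 : ((L.drop p.toNat).take k).length ≤ (L.drop p.toNat).length :=
      List.length_take_le' ..
    omega
  unfold checkWord
  rw [show (p + 3 : Int) = p + ((3 : Nat) : Int) by norm_num,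
      show (p + 4 : Int) = p + ((4 : Nat) : Int) by norm_num,
      show (p + 5 : Int) = p + ((5 : Nat) : Int) by norm_num,
      slice_drop_take L p 3 hp, slice_drop_take L p 4 hp, slice_drop_take L p 5 hp,
      get?_short _ (hlen 3), get?_short _ (hlen 4), get?_short _ (hlen 5)]

theorem checkWord_none_of_digit (L : List Char) (p : Int) (c : Char) (hp : 0 ≤ p)
    (hg : PySem.List.pyGet? L p = some c) (hd : PySem.Chars.isdigit c = true) :
    checkWord L p = none := by
  have hlt : p.toNat < L.length := by
    by_contra hge
    rw [PySem.List.pyGet?_of_nonneg L hp] at hg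
    rw [List.getElem?_eq_none (by omega)] at hg
    simp at hg
  have hc : L[p.toNat]? = some c := by
    rw [PySem.List.pyGet?_of_nonneg L hp] at hg; exact hg
  have hdrop : L.drop p.toNat = c :: L.drop (p.toNat + 1) := by
    rw [List.drop_eq_getElem_cons hlt]
    simp_all
  have htake : ∀ k : Nat, 0 < k → (L.drop p.toNat).take k = c :: (L.drop (p.toNat + 1)).take (k - 1) := by
    intro k hk
    rw [hdrop]
    cases k with
    | zero => omega
    | succ k' => simp
  unfold checkWord
  rw [show (p + 3 : Int) = p + ((3 : Nat) : Int) by norm_num,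
      show (p + 4 : Int) = p + ((4 : Nat) : Int) by norm_num,
      show (p + 5 : Int) = p + ((5 : Nat) : Int) by norm_num,
      slice_drop_take L p 3 hp, slice_drop_take L p 4 hp, slice_drop_take L p 5 hp,
      htake 3 (by omega), htake 4 (by omega), htake 5 (by omega),
      get?_digit_head c _ hd, get?_digit_head c _ hd, get?_digit_head c _ hd]

theorem dscan_spec (L : List Char) (m : Int) (i : Int) (c : Char)
    (h : dscan L m = some (i, c)) :
    i ≤ m ∧ 0 ≤ i ∧ PySem.List.pyGet? L i = some c ∧ PySem.Chars.isdigit c = true := by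
  fun_induction dscan L m with
  | case1 m h' => simp at h
  | case2 m h' c' hg hd =>
    simp only [Option.some.injEq, Prod.mk.injEq] at h
    obtain ⟨rfl, rfl⟩ := h
    exact ⟨le_refl _, by omega, hg, hd⟩
  | case3 m h' c' hg hd ih =>
    have := ih h
    exact ⟨by omega, this.2.1, this.2.2⟩
  | case4 m h' hg ih =>
    have := ih h
    exact ⟨by omega, this.2.1, this.2.2⟩

theorem dscan_append (L : List Char) (x : Char) (m : Int) (hm : m < (L.length : Int)) :
    dscan (L ++ [x]) m = dscan L m := by
  fun_induction dscan L m with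
  | case1 m h' => rw [dscan]; simp [h']
  | case2 m h' c' hg hd =>
    have hlt : m.toNat < L.length := by
      by_contra hge
      rw [PySem.List.pyGet?_of_nonneg L (by omega), List.getElem?_eq_none (by omega)] at hg
      simp at hg
    have hg2 : PySem.List.pyGet? (L ++ [x]) m = some c' := by
      rw [PySem.List.pyGet?_of_nonneg L (by omega)] at hg
      rw [PySem.List.pyGet?_of_nonneg (L ++ [x]) (by omega), List.getElem?_append_left hlt]
      exact hg
    rw [dscan]
    simp [h', hg2, hd]
  | case3 m h' c' hg hd ih =>
    have hlt : m.toNat < L.length := by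
      by_contra hge
      rw [PySem.List.pyGet?_of_nonneg L (by omega), List.getElem?_eq_none (by omega)] at hg
      simp at hg
    have hg2 : PySem.List.pyGet? (L ++ [x]) m = some c' := by
      rw [PySem.List.pyGet?_of_nonneg L (by omega)] at hg
      rw [PySem.List.pyGet?_of_nonneg (L ++ [x]) (by omega), List.getElem?_append_left hlt]
      exact hg
    rw [dscan]
    simp [h', hg2, hd]
    exact ih (by omega)
  | case4 m h' hg ih =>
    rw [PySem.List.pyGet?_of_nonneg L (by omega), List.getElem?_eq_none_iff] at hg
    omega

theorem enum_find_eq_dscan (L : List Char) :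
    (PySem.List.enumerate L 0).reverse.find? (fun p => PySem.Chars.isdigit p.2)
      = dscan L ((L.length : Int) - 1) := by
  induction L using List.reverseRecOn with
  | nil => rw [dscan]; simp [PySem.List.enumerate_nil]
  | append_singleton L x ih =>
    rw [PySem.List.enumerate_append, PySem.List.enumerate_cons, PySem.List.enumerate_nil]
    rw [List.reverse_append, List.reverse_singleton, List.singleton_append, List.find?_cons]
    have hmlen : ((L ++ [x]).length : Int) - 1 = (L.length : Int) := by
      rw [show (L ++ [x]).length = L.length + 1 by simp]
      push_cast
      omega
    have hget : PySem.List.pyGet? (L ++ [x]) ((L.length : Int)) = some x := by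
      simp
    cases hdig : PySem.Chars.isdigit x with
    | true =>
      rw [hmlen, dscan]
      simp [hdig]
    | false =>
      rw [hmlen, dscan]
      simp only [hget, hdig]
      rw [dif_neg (by omega : ¬ ((L.length : Int)) < 0)]
      simp only [Bool.false_eq_true, if_false]
      rw [dscan_append L x _ (by omega)]
      exact ih

theorem aInner_eq_checkWord (L : List Char) (j : Int) :
    aInner L j (PySem.List.pyRange (j + 3) (j + 6) 1) = checkWord L j := by
  rw [PySem.List.pyRange_one_cons (by omega : j + 3 < j + 6),
      show j + 3 + 1 = j + 4 by ring,
      PySem.List.pyRange_one_cons (by omega : j + 4 < j + 6),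
      show j + 4 + 1 = j + 5 by ring,
      PySem.List.pyRange_one_cons (by omega : j + 5 < j + 6),
      PySem.List.pyRange_one_eq_nil (by omega : j + 6 ≤ j + 5 + 1)]
  unfold checkWord
  rcases h3 : NUMS.get? (PySem.List.slice L (some j) (some (j + 3))) with _ | v3 <;>
    rcases h4 : NUMS.get? (PySem.List.slice L (some j) (some (j + 4))) with _ | v4 <;>
      rcases h5 : NUMS.get? (PySem.List.slice L (some j) (some (j + 5))) with _ | v5 <;>
        simp [aInner, h3, h4, h5]

theorem wscan_eq (L : List Char) (m t : Int) :
    wscan L m t = if m < t then none else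
      match checkWord L m with
      | some v => some v
      | none => wscan L (m - 1) t := by
  rw [wscan]
  by_cases h : m < t <;> simp [h]

theorem aOuter_eq_wscan (L : List Char) (m t : Int) :
    aOuter L (PySem.List.pyRange m (t - 1) (-1)) = wscan L m t := by
  by_cases h : m < t
  · rw [PySem.List.pyRange_neg_one_eq_nil (by omega), wscan_eq L m t]
    simp [h, aOuter]
  · rw [PySem.List.pyRange_neg_one_cons (by omega), wscan_eq L m t, if_neg h]
    unfold aOuter
    rw [aInner_eq_checkWord]
    cases hcw : checkWord L m with
    | some v => simp
    | none => exact aOuter_eq_wscan L (m - 1) t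
termination_by (m - t + 1).toNat
decreasing_by omega

theorem wscan_shift (L : List Char) (i : Int) (hc : checkWord L i = none) (m : Int) :
    wscan L m i = wscan L m (i + 1) := by
  by_cases h1 : m < i
  · rw [wscan_eq L m i, wscan_eq L m (i + 1), if_pos h1, if_pos (by omega : m < i + 1)]
  · by_cases h2 : m = i
    · subst h2
      rw [wscan_eq L m m, wscan_eq L m (m + 1), if_neg h1, if_pos (by omega : m < m + 1), hc]
      rw [wscan_eq L (m - 1) m, if_pos (by omega : m - 1 < m)]
    · rw [wscan_eq L m i, wscan_eq L m (i + 1), if_neg h1, if_neg (by omega : ¬ m < i + 1)]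
      cases hcw : checkWord L m with
      | some v => simp
      | none => exact wscan_shift L i hc (m - 1)
termination_by (m - i + 1).toNat
decreasing_by omega

theorem wscan_top (L : List Char) (m t : Int) (ht : 0 ≤ t)
    (hm : (L.length : Int) - 3 < m) : wscan L m t = wscan L (m - 1) t := by
  by_cases h1 : m < t
  · rw [wscan_eq L m t, wscan_eq L (m - 1) t, if_pos h1, if_pos (by omega : m - 1 < t)]
  · rw [wscan_eq L m t, if_neg h1, checkWord_none_of_right L m (by omega) hm]

theorem bloop_eq (L : List Char) (m : Int) (hm : m ≤ (L.length : Int) - 1) :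
    bloop L (PySem.List.pyRange m (-1) (-1)) =
      match dscan L m with
      | some (i, c) => (wscan L m (i + 1)).getD (String.ofList [c])
      | none => (wscan L m 0).getD "NOTFOUND" := by
  by_cases h0 : m < 0
  · rw [PySem.List.pyRange_neg_one_eq_nil (by omega), dscan, dif_pos h0,
      wscan_eq L m 0, if_pos (by omega : m < 0)]
    rfl
  · have hlt : m.toNat < L.length := by omega
    have hget : PySem.List.pyGet? L m = some (L[m.toNat]) := by
      rw [PySem.List.pyGet?_of_nonneg L (by omega), List.getElem?_eq_getElem hlt]
    rw [PySem.List.pyRange_neg_one_cons (by omega : -1 < m)]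
    unfold bloop
    rw [hget]
    cases hd : PySem.Chars.isdigit (L[m.toNat]) with
    | true =>
      rw [dscan, dif_neg h0, hget]
      simp only [hd, if_true]
      rw [wscan_eq L m (m + 1), if_pos (by omega : m < m + 1)]
      rfl
    | false =>
      dsimp only
      have hdstep : dscan L m = dscan L (m - 1) := by
        rw [dscan, dif_neg h0, hget]
        simp [hd]
      rw [hdstep, if_neg (by simp [hd])]
      cases hcw : checkWord L m with
      | some v =>
        dsimp only
        cases hds : dscan L (m - 1) with
        | none =>
          dsimp only
          rw [wscan_eq L m 0, if_neg (by omega : ¬ m < 0), hcw]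
          rfl
        | some ic =>
          obtain ⟨i, c⟩ := ic
          have hspec := dscan_spec L (m - 1) i c hds
          dsimp only
          rw [wscan_eq L m (i + 1), if_neg (by omega : ¬ m < i + 1), hcw]
          rfl
      | none =>
        dsimp only
        rw [bloop_eq L (m - 1) (by omega)]
        cases hds : dscan L (m - 1) with
        | none =>
          dsimp only
          rw [wscan_eq L m 0, if_neg (by omega : ¬ m < 0), hcw]
        | some ic =>
          obtain ⟨i, c⟩ := ic
          have hspec := dscan_spec L (m - 1) i c hds
          dsimp only
          rw [wscan_eq L m (i + 1), if_neg (by omega : ¬ m < i + 1), hcw]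
termination_by (m + 1).toNat
decreasing_by omega

-- ===== VERDICT (by name: the statement is the Claim_ definition above) =====
theorem find_num_right_spec : Claim_equal_find_num_right := by
  intro S _
  unfold Spec_find_num_right find_num_right find_num_right_alt
  simp only [enum_find_eq_dscan, bloop_eq S.toList ((S.toList.length : Int) - 1) (by omega)]
  cases hds : dscan S.toList ((S.toList.length : Int) - 1) with
  | none =>
    rw [show ((0 : Int) - 1) = 0 - 1 by ring, aOuter_eq_wscan S.toList _ 0]
    rw [wscan_top S.toList ((S.toList.length : Int) - 1) 0 (by omega) (by omega),
        wscan_top S.toList ((S.toList.length : Int) - 1 - 1) 0 (by omega) (by omega),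
        show (S.toList.length : Int) - 1 - 1 - 1 = (S.toList.length : Int) - 3 by ring]
    cases wscan S.toList ((S.toList.length : Int) - 3) 0 <;> rfl
  | some ic =>
    obtain ⟨i, c⟩ := ic
    obtain ⟨h1, h2, h3, h4⟩ := dscan_spec _ _ _ _ hds
    have hcw := checkWord_none_of_digit S.toList i c h2 h3 h4
    dsimp only
    rw [aOuter_eq_wscan S.toList _ i]
    rw [wscan_top S.toList ((S.toList.length : Int) - 1) (i + 1) (by omega) (by omega),
        wscan_top S.toList ((S.toList.length : Int) - 1 - 1) (i + 1) (by omega) (by omega),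
        show (S.toList.length : Int) - 1 - 1 - 1 = (S.toList.length : Int) - 3 by ring,
        ← wscan_shift S.toList i hcw ((S.toList.length : Int) - 3)]
    cases wscan S.toList ((S.toList.length : Int) - 3) i <;> rfl
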